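-- pv_equiv track=rewrite | github.com/Owen-Richards/ai-nutritionist | src/services/error_recovery_service.py | _generate_error_recommendations
-- ===== SOURCE A (Python) =====
-- from typing import Dict, List, Any, Optional, Callable
--
-- def _generate_error_recommendations(errors: List[Dict]) -> List[str]:
--     """Generate recommendations for improving system resilience"""
--     recommendations = []
--
--     if not errors:
--         return ['System appears healthy - continue monitoring']
--
--     error_types = {}
--     for error in errors:
--         error_type = error.get('error_pattern', 'unknown')
--         error_types[error_type] = error_types.get(error_type, 0) + 1
--
--     # Analyze most common errors
--     if error_types.get('api_rate_limit', 0) > 5: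
--         recommendations.append('Consider implementing more aggressive caching to reduce API calls')
--
--     if error_types.get('api_timeout', 0) > 3:
--         recommendations.append('Optimize API call timeouts and implement connection pooling')
--
--     if error_types.get('service_unavailable', 0) > 2:
--         recommendations.append('Implement more robust fallback mechanisms for external services')
--
--     return recommendations
-- ===== SOURCE B (Python) =====
-- from typing import Dict, List, Any, Optional, Callable
--
-- _RULES = [
--     ('api_rate_limit', 5, 'Consider implementing more aggressive caching to reduce API calls'),
--     ('api_timeout', 3, 'Optimize API call timeouts and implement connection pooling'),
--     ('service_unavailable', 2, 'Implement more robust fallback mechanisms for external services'),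
-- ]
--
-- def _generate_error_recommendations(errors: List[Dict]) -> List[str]:
--     if not errors:
--         return ['System appears healthy - continue monitoring']
--     recommendations = []
--     for pattern, threshold, message in _RULES:
--         needed = threshold + 1
--         for e in errors:
--             if e.get('error_pattern', 'unknown') == pattern:
--                 needed -= 1
--                 if needed == 0:
--                     recommendations.append(message)
--                     break
--     return recommendations
-- ===== Notes on version B (the rewrite author's own statement) =====
-- stated objective: alternative
-- what changed: Replaces A's exhaustive counter-dict pass plus hard-coded threshold lookups with a declarative rules table driving an early-exit quota scan per rule: each rule decrements a countdown of threshold+1 and breaks out of the scan the moment the quota is exhausted, so no full counts are ever computed.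
import Mathlib
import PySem

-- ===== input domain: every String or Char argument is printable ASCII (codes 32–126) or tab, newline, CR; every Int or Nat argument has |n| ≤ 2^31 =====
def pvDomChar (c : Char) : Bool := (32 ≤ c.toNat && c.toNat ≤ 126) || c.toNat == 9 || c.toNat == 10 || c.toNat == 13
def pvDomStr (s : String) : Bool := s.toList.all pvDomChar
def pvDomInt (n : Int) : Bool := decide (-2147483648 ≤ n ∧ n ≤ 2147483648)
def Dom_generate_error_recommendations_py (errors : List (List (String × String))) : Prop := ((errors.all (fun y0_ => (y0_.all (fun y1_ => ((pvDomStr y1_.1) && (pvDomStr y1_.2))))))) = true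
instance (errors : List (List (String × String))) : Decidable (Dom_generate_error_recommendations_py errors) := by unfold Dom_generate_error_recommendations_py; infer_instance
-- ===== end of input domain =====

-- B replaces A's exhaustive counter-dict pass plus hard-coded threshold lookups by a rules
-- table driving an early-exit quota scan per rule (break once threshold+1 matches are seen);
-- objective: alternative decomposition, not faster.

-- ===== PORT A =====
-- error.get('error_pattern', 'unknown')
def pvErrPattern (error : List (String × String)) : String :=
  (PySem.Dict.mk error).getD "error_pattern" "unknown"

def generate_error_recommendations_py (errors : List (List (String × String))) : List String :=
  if errors = [] then ["System appears healthy - continue monitoring"]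
  else
    let error_types : PySem.Dict String Int :=
      errors.foldl (fun d error =>
        let error_type := pvErrPattern error
        d.insert error_type (d.getD error_type 0 + 1)) PySem.Dict.empty
    let recommendations : List String := []
    let recommendations :=
      if error_types.getD "api_rate_limit" 0 > 5 then
        recommendations ++ ["Consider implementing more aggressive caching to reduce API calls"]
      else recommendations
    let recommendations :=
      if error_types.getD "api_timeout" 0 > 3 then
        recommendations ++ ["Optimize API call timeouts and implement connection pooling"]
      else recommendations
    let recommendations :=
      if error_types.getD "service_unavailable" 0 > 2 then
        recommendations ++ ["Implement more robust fallback mechanisms for external services"]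
      else recommendations
    recommendations

-- ===== PORT B =====
def pvRules : List (String × Int × String) :=
  [("api_rate_limit", 5, "Consider implementing more aggressive caching to reduce API calls"),
   ("api_timeout", 3, "Optimize API call timeouts and implement connection pooling"),
   ("service_unavailable", 2, "Implement more robust fallback mechanisms for external services")]

-- inner loop: scan errors with countdown 'needed'; true iff the quota is exhausted (break)
def pvQuotaHit : List (List (String × String)) → String → Int → Bool
  | [], _, _ => false
  | e :: rest, pattern, needed =>
    if (PySem.Dict.mk e).getD "error_pattern" "unknown" = pattern then
      if needed - 1 = 0 then true else pvQuotaHit rest pattern (needed - 1)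
    else pvQuotaHit rest pattern needed

def generate_error_recommendations_py_alt (errors : List (List (String × String))) : List String :=
  if errors = [] then ["System appears healthy - continue monitoring"]
  else
    pvRules.foldl (fun recommendations r =>
      if pvQuotaHit errors r.1 (r.2.1 + 1) then recommendations ++ [r.2.2]
      else recommendations) []

-- ===== PRECONDITION & SPEC =====
def Spec_generate_error_recommendations_py (errors : List (List (String × String))) (out : List String) : Prop := out = generate_error_recommendations_py_alt errors
instance (errors : List (List (String × String))) (out : List String) : Decidable (Spec_generate_error_recommendations_py errors out) := by unfold Spec_generate_error_recommendations_py; infer_instance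

-- ===== CLAIM =====
def Claim_equal_generate_error_recommendations_py : Prop := ∀ (errors : List (List (String × String))), Dom_generate_error_recommendations_py errors → Spec_generate_error_recommendations_py errors (generate_error_recommendations_py errors)

-- ===== LEMMAS AND PROOFS =====

-- the quota scan succeeds iff the full match count reaches the quota
theorem pvQuotaHit_iff_count (errors : List (List (String × String))) (p : String) :
    ∀ n : Int, 1 ≤ n →
      (pvQuotaHit errors p n = true ↔ n ≤ ((errors.map pvErrPattern).count p : Int)) := by
  induction errors with
  | nil =>
    intro n hn
    simp only [pvQuotaHit, List.map_nil, List.count_nil, Nat.cast_zero]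
    constructor
    · intro h; cases h
    · intro h; omega
  | cons e rest ih =>
    intro n hn
    simp only [pvQuotaHit, List.map_cons]
    by_cases hm : (PySem.Dict.mk e).getD "error_pattern" "unknown" = p
    · have hpe : pvErrPattern e = p := hm
      simp only [hm, if_pos, hpe, List.count_cons_self]
      by_cases h1 : n - 1 = 0
      · simp only [if_pos h1]
        constructor
        · intro _; push_cast; omega
        · intro _; trivial
      · simp only [if_neg h1]
        rw [ih (n - 1) (by omega)]
        push_cast; omega
    · have hpe : pvErrPattern e ≠ p := hm
      simp only [hm, if_neg, not_false_iff]
      rw [List.count_cons_of_ne hpe, ih n hn]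

-- A's counter-dict lookup equals the full match count
theorem pvDict_eq_count (errors : List (List (String × String))) (p : String) :
    (errors.foldl (fun d error =>
        let error_type := pvErrPattern error
        d.insert error_type (d.getD error_type 0 + 1)) PySem.Dict.empty).getD p 0
      = ((errors.map pvErrPattern).count p : Int) := by
  show (List.foldl (fun (d : PySem.Dict String Int) error =>
          d.insert (pvErrPattern error) (d.getD (pvErrPattern error) 0 + 1))
        PySem.Dict.empty errors).getD p 0 = _
  rw [← List.foldl_map (f := pvErrPattern)
        (g := fun (d : PySem.Dict String Int) x => d.insert x (d.getD x 0 + 1)),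
      PySem.Dict.foldl_insert_getD_add_one_eq_counter, PySem.Dict.getD_counter]

-- A's threshold test for a rule equals B's early-exit quota scan
theorem pvCond_iff (errors : List (List (String × String))) (p : String) (t : Int)
    (ht : 0 ≤ t) :
    ((errors.foldl (fun d error =>
        let error_type := pvErrPattern error
        d.insert error_type (d.getD error_type 0 + 1)) PySem.Dict.empty).getD p 0 > t)
      ↔ (pvQuotaHit errors p (t + 1) = true) := by
  rw [pvDict_eq_count, pvQuotaHit_iff_count errors p (t + 1) (by omega)]
  omega

-- ===== VERDICT =====
theorem generate_error_recommendations_py_spec : Claim_equal_generate_error_recommendations_py := by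
  intro errors _
  unfold Spec_generate_error_recommendations_py generate_error_recommendations_py generate_error_recommendations_py_alt
  by_cases h : errors = []
  · simp [h]
  · simp only [h, if_false]
    simp only [pvRules, List.foldl]
    simp only [pvCond_iff errors "api_rate_limit" 5 (by norm_num),
        pvCond_iff errors "api_timeout" 3 (by norm_num),
        pvCond_iff errors "service_unavailable" 2 (by norm_num)]
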